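-- pv_equiv track=rewrite | github.com/TheMoira/6_semester | python/pnlab5.py | gen8_f
-- ===== SOURCE A (Python) =====
-- def gen8_f(seq):
--     count = 0
--     for i in seq:
--         if i:
--             yield count
--             count = 0
--         else:
--             count += 1
-- ===== SOURCE B (Python) =====
-- def gen8_f(seq):
--     # Index-based decomposition: the k-th yielded value is the gap of falsy
--     # elements between consecutive truthy positions (previous position -1 at start).
--     idxs = [i for i, x in enumerate(seq) if x]
--     prev = -1
--     for i in idxs:
--         yield i - prev - 1
--         prev = i
-- ===== Notes on version B (the rewrite author's own statement) =====
-- stated objective: alternative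
-- what changed: Replaces the falsy-run counter loop by a two-phase decomposition: first collect the positions of truthy elements, then yield the gap between consecutive truthy positions (previous position starting at -1).
import Mathlib
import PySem

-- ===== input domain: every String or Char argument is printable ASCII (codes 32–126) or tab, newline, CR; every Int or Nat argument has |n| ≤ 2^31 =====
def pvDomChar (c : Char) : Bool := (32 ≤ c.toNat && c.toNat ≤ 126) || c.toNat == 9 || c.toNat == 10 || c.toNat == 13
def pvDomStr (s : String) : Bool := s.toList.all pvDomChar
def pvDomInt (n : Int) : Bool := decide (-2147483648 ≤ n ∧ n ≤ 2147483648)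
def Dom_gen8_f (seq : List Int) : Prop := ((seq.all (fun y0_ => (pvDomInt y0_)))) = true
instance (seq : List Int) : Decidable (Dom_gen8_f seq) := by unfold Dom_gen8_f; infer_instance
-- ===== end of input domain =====

-- ===== PORT A =====
-- B: two-phase decomposition (truthy positions, then consecutive gaps) instead of A's falsy-run counter; same cost.
-- loop of A: count falsy elements, yield the count at each truthy element
def gen8_go (seq : List Int) (count : Int) : List Int :=
  match seq with
  | [] => []
  | i :: rest => if i ≠ 0 then count :: gen8_go rest 0 else gen8_go rest (count + 1)

def gen8_f (seq : List Int) : List Int := gen8_go seq 0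

-- ===== PORT B =====
-- gap loop of B: yield i - prev - 1 for each truthy index
def gen8_alt_go (idxs : List Int) (prev : Int) : List Int :=
  match idxs with
  | [] => []
  | i :: rest => (i - prev - 1) :: gen8_alt_go rest i

def gen8_f_alt (seq : List Int) : List Int :=
  let idxs := ((PySem.List.enumerate seq).filter (fun p => p.2 ≠ 0)).map Prod.fst
  gen8_alt_go idxs (-1)

-- ===== PRECONDITION & SPEC =====
def Spec_gen8_f (seq : List Int) (out : List Int) : Prop := out = gen8_f_alt seq
instance (seq : List Int) (out : List Int) : Decidable (Spec_gen8_f seq out) := by unfold Spec_gen8_f; infer_instance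

-- ===== CLAIM (what is proved, stated in full; the proofs are below) =====
def Claim_equal_gen8_f : Prop := ∀ (seq : List Int), Dom_gen8_f seq → Spec_gen8_f seq (gen8_f seq)

-- ===== LEMMAS AND PROOFS =====

-- ===== VERDICT (by name: the statement is the Claim_ definition above) =====
-- truthy indices of seq starting at base k, as a structural recursion (proof helper)
def idxsFrom (seq : List Int) (k : Int) : List Int :=
  match seq with
  | [] => []
  | x :: rest => if x ≠ 0 then k :: idxsFrom rest (k + 1) else idxsFrom rest (k + 1)

theorem enum_filter_eq_idxsFrom (seq : List Int) (k : Int) :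
    ((PySem.List.enumerate seq k).filter (fun p => p.2 ≠ 0)).map Prod.fst = idxsFrom seq k := by
  induction seq generalizing k with
  | nil => simp [PySem.List.enumerate_nil, idxsFrom]
  | cons x rest ih =>
    simp only [ne_eq, decide_not] at ih ⊢
    simp only [PySem.List.enumerate_cons, idxsFrom, List.filter_cons]
    by_cases hx : x = 0 <;> simp [hx, ih]

theorem go_eq_alt_go (seq : List Int) (count k : Int) :
    gen8_go seq count = gen8_alt_go (idxsFrom seq k) (k - count - 1) := by
  induction seq generalizing count k with
  | nil => simp [gen8_go, idxsFrom, gen8_alt_go]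
  | cons x rest ih =>
    by_cases hx : x = 0
    · have h := ih (count + 1) (k + 1)
      simp only [gen8_go, idxsFrom, hx]
      simp only [ne_eq, not_true_eq_false, if_false]
      rw [h]; ring_nf
    · have h0 := ih 0 (k + 1)
      simp only [gen8_go, idxsFrom, hx, ne_eq, not_false_eq_true, if_true, gen8_alt_go]
      rw [h0]
      congr 1
      · ring
      · congr 1; ring

theorem gen8_f_spec : Claim_equal_gen8_f := by
  intro seq _
  unfold Spec_gen8_f gen8_f gen8_f_alt
  rw [enum_filter_eq_idxsFrom]
  have := go_eq_alt_go seq 0 0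
  simpa using this
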